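-- pv_equiv track=rewrite | github.com/blzzua/codewars | 7-kyu/bits_battle.py | bits_battle
-- ===== SOURCE A (Python) =====
-- def bits_battle(numbers):
--     chet   = ''.join([format(n, 'b') for n in numbers if n % 2 == 0 and n != 0])
--     nechet = ''.join([format(n, 'b') for n in numbers if n % 2 != 0 and n != 0])
--
--     chet_score = sum(1 for char in chet if char == '0')
--     nechet_score = sum(1 for char in nechet if char == '1')
--
--     if chet_score > nechet_score:
--         return 'evens win'
--     elif chet_score < nechet_score:
--         return 'odds win'
--     else:
--         return 'tie'
-- ===== SOURCE B (Python) =====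
-- def bits_battle(numbers):
--     balance = 0
--     for n in numbers:
--         if n == 0:
--             continue
--         even = n % 2 == 0
--         m = abs(n)
--         while m:
--             bit = m & 1
--             balance += (1 - bit) if even else -bit
--             m >>= 1
--     if balance > 0:
--         return 'evens win'
--     elif balance < 0:
--         return 'odds win'
--     else:
--         return 'tie'
-- ===== Notes on version B (the rewrite author's own statement) =====
-- stated objective: alternative
-- what changed: Replaces string building and character counting entirely: a single signed balance is accumulated by a manual bit-extraction loop over |n| (+1 per zero bit of an even, -1 per one bit of an odd), and the winner is read off the sign of that one accumulator instead of comparing two counts.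
import Mathlib
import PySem

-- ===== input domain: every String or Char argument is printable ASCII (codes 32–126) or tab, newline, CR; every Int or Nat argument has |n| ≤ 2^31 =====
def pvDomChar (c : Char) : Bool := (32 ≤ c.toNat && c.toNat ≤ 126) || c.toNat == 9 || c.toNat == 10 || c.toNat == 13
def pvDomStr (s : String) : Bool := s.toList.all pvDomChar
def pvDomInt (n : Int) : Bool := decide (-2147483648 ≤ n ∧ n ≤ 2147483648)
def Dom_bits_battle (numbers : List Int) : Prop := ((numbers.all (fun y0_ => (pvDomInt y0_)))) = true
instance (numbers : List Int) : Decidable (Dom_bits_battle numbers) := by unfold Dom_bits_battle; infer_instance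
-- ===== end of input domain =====

-- B drops A's binary-string building: one signed balance accumulated by a manual bit loop, winner read from its sign (alternative decomposition, not claimed faster).


-- ===== PORT A =====
-- binary digits of a natural number, MSB first (format(m,'b') for m > 0; [] for m = 0)
def pvNatBin (m : Nat) : List Char :=
  if h : m = 0 then [] else pvNatBin (m / 2) ++ [if m % 2 = 1 then '1' else '0']
decreasing_by exact Nat.div_lt_self (Nat.pos_of_ne_zero h) (by omega)

-- format(n, 'b') : sign prefix for negatives (exact for n ≠ 0, the only use)
def pvFormatB (n : Int) : List Char :=
  if n < 0 then '-' :: pvNatBin n.natAbs else pvNatBin n.toNat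

def bits_battle (numbers : List Int) : String :=
  let chet := ((numbers.filter (fun n => decide (PySem.Int.mod n 2 = 0 ∧ n ≠ 0))).map pvFormatB).flatten
  let nechet := ((numbers.filter (fun n => decide (PySem.Int.mod n 2 ≠ 0 ∧ n ≠ 0))).map pvFormatB).flatten
  let chet_score := chet.countP (fun c => c == '0')
  let nechet_score := nechet.countP (fun c => c == '1')
  if chet_score > nechet_score then "evens win"
  else if chet_score < nechet_score then "odds win"
  else "tie"

-- ===== PORT B =====
-- the inner 'while m: bit = m & 1; balance += (1-bit) if even else -bit; m >>= 1'
def pvBalLoop (m : Nat) (even : Bool) (balance : Int) : Int :=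
  if h : m = 0 then balance
  else pvBalLoop (m / 2) even
        (balance + (if even then 1 - (m % 2 : Int) else -((m % 2 : Nat) : Int)))
decreasing_by exact Nat.div_lt_self (Nat.pos_of_ne_zero h) (by omega)

def bits_battle_alt (numbers : List Int) : String :=
  let balance := numbers.foldl
    (fun bal n => if n = 0 then bal
      else pvBalLoop n.natAbs (decide (PySem.Int.mod n 2 = 0)) bal) 0
  if balance > 0 then "evens win"
  else if balance < 0 then "odds win"
  else "tie"

-- ===== PRECONDITION & SPEC =====
def Spec_bits_battle (numbers : List Int) (out : String) : Prop := out = bits_battle_alt numbers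
instance (numbers : List Int) (out : String) : Decidable (Spec_bits_battle numbers out) := by unfold Spec_bits_battle; infer_instance

-- ===== CLAIM (what is proved, stated in full; the proofs are below) =====
def Claim_equal_bits_battle : Prop := ∀ (numbers : List Int), Dom_bits_battle numbers → Spec_bits_battle numbers (bits_battle numbers)

-- ===== LEMMAS AND PROOFS =====

-- B's bit loop in 'even' mode adds the number of '0' digits of the binary string
theorem pvBalLoop_true (m : Nat) : ∀ s : Int,
    pvBalLoop m true s = s + ((pvNatBin m).countP (fun c => c == '0') : Int) := by
  induction m using Nat.strong_induction_on with
  | _ m ih =>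
    intro s
    unfold pvBalLoop pvNatBin
    split
    · simp
    · next h =>
      rw [ih (m / 2) (Nat.div_lt_self (Nat.pos_of_ne_zero h) (by omega))]
      rw [List.countP_append]
      rcases Nat.mod_two_eq_zero_or_one m with h2 | h2 <;> simp [h2] <;> omega

-- B's bit loop in 'odd' mode subtracts the number of '1' digits of the binary string
theorem pvBalLoop_false (m : Nat) : ∀ s : Int,
    pvBalLoop m false s = s - ((pvNatBin m).countP (fun c => c == '1') : Int) := by
  induction m using Nat.strong_induction_on with
  | _ m ih =>
    intro s
    unfold pvBalLoop pvNatBin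
    split
    · simp
    · next h =>
      rw [ih (m / 2) (Nat.div_lt_self (Nat.pos_of_ne_zero h) (by omega))]
      rw [List.countP_append]
      rcases Nat.mod_two_eq_zero_or_one m with h2 | h2 <;> simp [h2] <;> omega

-- the '-' sign prefix contributes no '0' digit
theorem pvFormatB_zeros (n : Int) :
    (pvFormatB n).countP (fun c => c == '0') = (pvNatBin n.natAbs).countP (fun c => c == '0') := by
  unfold pvFormatB
  split
  · next h => simp
  · next h =>
    have : n.toNat = n.natAbs := by omega
    rw [this]

-- the '-' sign prefix contributes no '1' digit
theorem pvFormatB_ones (n : Int) :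
    (pvFormatB n).countP (fun c => c == '1') = (pvNatBin n.natAbs).countP (fun c => c == '1') := by
  unfold pvFormatB
  split
  · next h => simp
  · next h =>
    have : n.toNat = n.natAbs := by omega
    rw [this]

-- A's two scores, as functions of the list
def pvChet (numbers : List Int) : Nat :=
  (((numbers.filter (fun n => decide (PySem.Int.mod n 2 = 0 ∧ n ≠ 0))).map pvFormatB).flatten).countP
    (fun c => c == '0')
def pvNechet (numbers : List Int) : Nat :=
  (((numbers.filter (fun n => decide (PySem.Int.mod n 2 ≠ 0 ∧ n ≠ 0))).map pvFormatB).flatten).countP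
    (fun c => c == '1')

-- B's fold computes A's score difference (with any starting balance)
theorem pvFold_balance (numbers : List Int) : ∀ s : Int,
    numbers.foldl
      (fun bal n => if n = 0 then bal
        else pvBalLoop n.natAbs (decide (PySem.Int.mod n 2 = 0)) bal) s
      = s + (pvChet numbers : Int) - (pvNechet numbers : Int) := by
  induction numbers with
  | nil => intro s; simp [pvChet, pvNechet]
  | cons n rest ih =>
    intro s
    simp only [List.foldl_cons]
    by_cases h0 : n = 0
    · subst h0
      rw [if_pos rfl, ih]
      simp [pvChet, pvNechet]
    · rw [if_neg h0]
      by_cases he : PySem.Int.mod n 2 = 0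
      · have he2 : n % 2 = 0 := by
          rw [← PySem.Int.mod_eq_emod_of_pos (a := n) (by omega : (0:Int) < 2)]; exact he
        have hd : (2 : Int) ∣ n := by omega
        have hc : pvChet (n :: rest) = (pvFormatB n).countP (fun c => c == '0') + pvChet rest := by
          simp [pvChet, h0, hd]
        have hn : pvNechet (n :: rest) = pvNechet rest := by
          simp [pvNechet, h0, he2]
        rw [show (decide (PySem.Int.mod n 2 = 0)) = true from decide_eq_true he]
        rw [ih, pvBalLoop_true, hc, hn, pvFormatB_zeros]
        push_cast; ring
      · have he2 : ¬ n % 2 = 0 := by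
          rw [← PySem.Int.mod_eq_emod_of_pos (a := n) (by omega : (0:Int) < 2)]; exact he
        have hd : ¬ (2 : Int) ∣ n := by omega
        have h1 : n % 2 = 1 := by omega
        have hc : pvChet (n :: rest) = pvChet rest := by
          simp [pvChet, h0, hd]
        have hn : pvNechet (n :: rest) = (pvFormatB n).countP (fun c => c == '1') + pvNechet rest := by
          simp [pvNechet, h0, h1]
        rw [show (decide (PySem.Int.mod n 2 = 0)) = false from decide_eq_false he]
        rw [ih, pvBalLoop_false, hc, hn, pvFormatB_ones]
        push_cast; ring

-- ===== VERDICT (by name: the statement is the Claim_ definition above) =====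
theorem bits_battle_spec : Claim_equal_bits_battle := by
  intro numbers _
  unfold Spec_bits_battle bits_battle bits_battle_alt
  rw [pvFold_balance numbers 0]
  show (if pvChet numbers > pvNechet numbers then "evens win"
    else if pvChet numbers < pvNechet numbers then "odds win" else "tie")
    = (if (0 + (pvChet numbers : Int) - (pvNechet numbers : Int)) > 0 then "evens win"
    else if (0 + (pvChet numbers : Int) - (pvNechet numbers : Int)) < 0 then "odds win" else "tie")
  by_cases h1 : pvChet numbers > pvNechet numbers
  · have h1' : (0 + (pvChet numbers : Int) - (pvNechet numbers : Int)) > 0 := by push_cast; omega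
    rw [if_pos h1, if_pos h1']
  · have h1' : ¬ (0 + (pvChet numbers : Int) - (pvNechet numbers : Int)) > 0 := by push_cast; omega
    rw [if_neg h1, if_neg h1']
    by_cases h2 : pvChet numbers < pvNechet numbers
    · have h2' : (0 + (pvChet numbers : Int) - (pvNechet numbers : Int)) < 0 := by push_cast; omega
      rw [if_pos h2, if_pos h2']
    · have h2' : ¬ (0 + (pvChet numbers : Int) - (pvNechet numbers : Int)) < 0 := by push_cast; omega
      rw [if_neg h2, if_neg h2']
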